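-- pv_equiv track=rewrite | github.com/hyeonjun/AlgorithmTest | Algorithm_Study/Algorithm_Type/Search_Basic_1.py | solution
-- ===== SOURCE A (Python) =====
-- def solution(n, name):
--     book = {}
--     for i in name:
--         if i in book:
--             book[i] += 1
--         else:
--             book[i] = 1
--     maxV = max(book.values())
--     answer = [i for i in book if book[i] == maxV]
--
--     return sorted(answer)[0]
-- ===== SOURCE B (Python) =====
-- def solution(n, name):
--     book = {}
--     for i in name:
--         if i in book:
--             book[i] += 1
--         else:
--             book[i] = 1
--     return min(book, key=lambda k: (-book[k], k))
-- ===== Notes on version B (the rewrite author's own statement) =====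
-- stated objective: simpler
-- what changed: The three-pass tail (max over values, tie-list comprehension, full sort and take head) is collapsed into a single min over the keys with the composite key (-count, key), so no intermediate max value, tie list or sort is built.
import Mathlib
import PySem

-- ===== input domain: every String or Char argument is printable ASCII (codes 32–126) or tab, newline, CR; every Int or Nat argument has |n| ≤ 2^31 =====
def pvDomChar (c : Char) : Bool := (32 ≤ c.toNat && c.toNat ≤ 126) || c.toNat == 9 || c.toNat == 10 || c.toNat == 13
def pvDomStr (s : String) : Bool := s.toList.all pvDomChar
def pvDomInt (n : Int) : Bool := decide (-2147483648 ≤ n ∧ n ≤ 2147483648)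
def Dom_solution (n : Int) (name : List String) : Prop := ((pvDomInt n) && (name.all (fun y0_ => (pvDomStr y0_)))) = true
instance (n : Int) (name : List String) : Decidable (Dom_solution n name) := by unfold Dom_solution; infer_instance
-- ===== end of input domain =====

-- B replaces A's three-pass tail (max over values, tie-list comprehension, sort-and-take-head)
-- by a single min over the keys with the composite key (-count, key); the counting loop is kept.

-- ===== PORT A =====
def solution (n : Int) (name : List String) : String :=
  let book := name.foldl
    (fun d i => if d.contains i then d.insert i (d.getD i 0 + 1) else d.insert i 1)
    (PySem.Dict.empty : PySem.Dict String Int)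
  match PySem.List.max? book.values (fun v => v) with
  | none => ""   -- max() of an empty dict: Python raises ValueError there; excluded by Pre_solution
  | some maxV =>
    let answer := book.keys.filter (fun i => book.getD i 0 == maxV)
    (PySem.List.pyGet? (PySem.List.sorted answer (fun x => x) false) 0).getD ""

-- ===== PORT B =====
def solution_alt (n : Int) (name : List String) : String :=
  let book := name.foldl
    (fun d i => if d.contains i then d.insert i (d.getD i 0 + 1) else d.insert i 1)
    (PySem.Dict.empty : PySem.Dict String Int)
  (PySem.List.min2? book.keys (fun k => -(book.getD k 0)) (fun k => k)).getD ""

-- ===== PRECONDITION & SPEC =====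
-- Python A raises ValueError (max() of an empty sequence) when name is empty; only that is excluded.
def Pre_solution (n : Int) (name : List String) : Prop := name ≠ []
instance (n : Int) (name : List String) : Decidable (Pre_solution n name) := by
  unfold Pre_solution; infer_instance
def pvWitness_solution : Int × List String := (3, ["b", "a", "b"])

def Spec_solution (n : Int) (name : List String) (out : String) : Prop := out = solution_alt n name
instance (n : Int) (name : List String) (out : String) : Decidable (Spec_solution n name out) := by
  unfold Spec_solution; infer_instance

-- ===== CLAIM (what is proved, stated in full; the proofs are below) =====
def Claim_equal_solution : Prop := ∀ (n : Int) (name : List String), Dom_solution n name → Pre_solution n name → Spec_solution n name (solution n name)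

-- ===== LEMMAS AND PROOFS =====

-- the shared counting loop is Counter(name)
theorem book_eq_counter (name : List String) :
    name.foldl (fun d i => if d.contains i then d.insert i (d.getD i 0 + 1) else d.insert i 1)
      (PySem.Dict.empty : PySem.Dict String Int) = PySem.Dict.counter name := by
  have h : (fun (d : PySem.Dict String Int) (i : String) =>
      if d.contains i then d.insert i (d.getD i 0 + 1) else d.insert i 1)
      = fun d i => d.insert i (d.getD i 0 + 1) := by
    funext d i
    by_cases hc : d.contains i = true
    · simp [hc]
    · simp only [Bool.not_eq_true] at hc
      simp [hc, PySem.Dict.getD_of_not_contains d 0 hc]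
  rw [h, PySem.Dict.foldl_insert_getD_add_one_eq_counter]

-- the composite-key lex preorder that B minimises
def lexLe (cnt : String → Int) (a b : String) : Prop :=
  -cnt a < -cnt b ∨ (-cnt a = -cnt b ∧ a ≤ b)

theorem lexLe_refl (cnt : String → Int) (a : String) : lexLe cnt a a :=
  Or.inr ⟨rfl, le_refl a⟩

theorem lexLe_trans (cnt : String → Int) {a b c : String}
    (h1 : lexLe cnt a b) (h2 : lexLe cnt b c) : lexLe cnt a c := by
  rcases h1 with h1 | ⟨h1, h1'⟩ <;> rcases h2 with h2 | ⟨h2, h2'⟩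
  · exact Or.inl (lt_trans h1 h2)
  · exact Or.inl (h2 ▸ h1)
  · exact Or.inl (h1 ▸ h2)
  · exact Or.inr ⟨h1.trans h2, le_trans h1' h2'⟩

-- B's fold step, named so the invariant can be stated
def min2Step (cnt : String → Int) (acc : Option String) (x : String) : Option String :=
  match acc with
  | none => some x
  | some m =>
    if (decide (-(cnt x) < -(cnt m)) || !decide (-(cnt m) < -(cnt x)) && decide (x < m)) = true
    then some x else some m

theorem min2Step_cases (cnt : String → Int) (a x : String) :
    ∃ c, min2Step cnt (some a) x = some c ∧ (c = a ∨ c = x) ∧ lexLe cnt c a ∧ lexLe cnt c x := by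
  by_cases h1 : -(cnt x) < -(cnt a)
  · exact ⟨x, by simp [min2Step, h1], Or.inr rfl, Or.inl h1, lexLe_refl cnt x⟩
  · by_cases h2 : -(cnt a) < -(cnt x)
    · exact ⟨a, by simp [min2Step, h1, h2], Or.inl rfl, lexLe_refl cnt a, Or.inl h2⟩
    · have heq : -(cnt a) = -(cnt x) := by omega
      by_cases h3 : x < a
      · exact ⟨x, by simp [min2Step, h1, h2, h3], Or.inr rfl,
          Or.inr ⟨heq.symm, le_of_lt h3⟩, lexLe_refl cnt x⟩
      · exact ⟨a, by simp [min2Step, h1, h2, h3], Or.inl rfl, lexLe_refl cnt a,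
          Or.inr ⟨heq, not_lt.mp h3⟩⟩

theorem min2_foldl_min (cnt : String → Int) :
    ∀ (xs : List String) (a : String),
      ∃ r, xs.foldl (min2Step cnt) (some a) = some r ∧ r ∈ a :: xs ∧ ∀ y ∈ a :: xs, lexLe cnt r y := by
  intro xs
  induction xs with
  | nil =>
    intro a
    exact ⟨a, rfl, List.mem_singleton.mpr rfl, by
      intro y hy; rw [List.mem_singleton] at hy; exact hy ▸ lexLe_refl cnt a⟩
  | cons x t ih =>
    intro a
    obtain ⟨c, hc, hc_or, hca, hcx⟩ := min2Step_cases cnt a x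
    obtain ⟨r, hr, hrmem, hrmin⟩ := ih c
    refine ⟨r, by simpa [hc] using hr, ?_, ?_⟩
    · rcases List.mem_cons.mp hrmem with h | h
      · rcases hc_or with rfl | rfl
        · exact h ▸ List.mem_cons_self
        · exact h ▸ List.mem_cons_of_mem _ List.mem_cons_self
      · exact List.mem_cons_of_mem _ (List.mem_cons_of_mem _ h)
    · intro y hy
      have hrc : lexLe cnt r c := hrmin c List.mem_cons_self
      rcases List.mem_cons.mp hy with rfl | hy
      · exact lexLe_trans cnt hrc hca
      · rcases List.mem_cons.mp hy with rfl | hy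
        · exact lexLe_trans cnt hrc hcx
        · exact hrmin y (List.mem_cons_of_mem _ hy)

theorem min2?_min (cnt : String → Int) (x : String) (xs : List String) :
    ∃ r, PySem.List.min2? (x :: xs) (fun k => -(cnt k)) (fun k => k) = some r ∧
      r ∈ x :: xs ∧ ∀ y ∈ x :: xs, lexLe cnt r y := by
  have hdef : PySem.List.min2? (x :: xs) (fun k => -(cnt k)) (fun k => k)
      = xs.foldl (min2Step cnt) (some x) := by
    unfold PySem.List.min2?
    have h2 : List.foldl (min2Step cnt) none (x :: xs) = List.foldl (min2Step cnt) (some x) xs := by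
      rw [List.foldl_cons]; rfl
    rw [← h2]
    apply PySem.List.foldl_congr_mem
    intro acc y _
    cases acc <;> rfl
  rw [hdef]
  exact min2_foldl_min cnt xs x

-- ===== VERDICT (by name: the statement is the Claim_ definition above) =====
theorem solution_spec : Claim_equal_solution := by
  intro n name _ hpre
  show solution n name = solution_alt n name
  cases name with
  | nil => exact absurd rfl hpre
  | cons hd tl =>
  simp only [solution, solution_alt]
  rw [book_eq_counter]
  set book := PySem.Dict.counter (hd :: tl) with hbook
  -- the key list is nonempty
  have hhd : hd ∈ book.keys := by
    rw [hbook, PySem.Dict.keys_counter]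
    exact (PySem.Set.mem_ofList _ _).mpr List.mem_cons_self
  cases hk : book.keys with
  | nil => rw [hk] at hhd; exact absurd hhd (List.not_mem_nil)
  | cons a s' =>
  -- B's side: the lex-minimal key r
  obtain ⟨r, hmin2, hrmem, hrall⟩ := min2?_min (fun k => book.getD k 0) a s'
  rw [hmin2]
  -- A's side: values = keys.map getD, and max? returns some m
  have hvals : book.values = book.keys.map (fun k => book.getD k 0) := by
    rw [hbook]
    exact PySem.Dict.values_eq_map_keys _ (PySem.Dict.nodup_keys_counter _) 0
  have hvne : book.values ≠ [] := by
    rw [hvals, hk]; simp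
  cases hmax : PySem.List.max? book.values (fun v => v) with
  | none => exact absurd ((PySem.List.max?_eq_none_iff _ _).mp hmax) hvne
  | some m =>
  show (PySem.List.pyGet? (PySem.List.sorted ((a :: s').filter (fun i => book.getD i 0 == m)) (fun x => x) false) 0).getD ""
      = (some r).getD ""
  have hall_le : ∀ k ∈ a :: s', book.getD k 0 ≤ m := by
    intro k hkmem
    exact PySem.List.max?_isMax hmax (book.getD k 0)
      (hvals ▸ List.mem_map_of_mem (hk ▸ hkmem))
  have hex : ∃ k ∈ a :: s', book.getD k 0 = m := by
    have hm := PySem.List.max?_mem hmax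
    rw [hvals, hk] at hm
    obtain ⟨k, hk1, hk2⟩ := List.mem_map.mp hm
    exact ⟨k, hk1, hk2⟩
  -- book.getD r 0 = m
  have hrcnt : book.getD r 0 = m := by
    obtain ⟨k, hk1, hk2⟩ := hex
    have h' := hrall k hk1
    unfold lexLe at h'
    beta_reduce at h'
    have hle := hall_le r hrmem
    rcases h' with h | ⟨h, _⟩ <;> omega
  -- r is in answer and below every element of answer
  have hrans : r ∈ (a :: s').filter (fun i => book.getD i 0 == m) := by
    rw [List.mem_filter]
    exact ⟨hrmem, by simp [hrcnt]⟩
  have hrle : ∀ y ∈ (a :: s').filter (fun i => book.getD i 0 == m), r ≤ y := by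
    intro y hy
    rw [List.mem_filter] at hy
    obtain ⟨hy1, hy2⟩ := hy
    have hy2' : book.getD y 0 = m := by simpa using hy2
    have h' := hrall y hy1
    unfold lexLe at h'
    beta_reduce at h'
    rcases h' with h | ⟨_, h⟩
    · omega
    · exact h
  -- sorted answer starts with r
  set answer := (a :: s').filter (fun i => book.getD i 0 == m) with hans
  set t := PySem.List.sorted answer (fun x => x) false with ht
  have hperm : t.Perm answer := PySem.List.sorted_perm _ _ _
  have hrt : r ∈ t := hperm.mem_iff.mpr hrans
  obtain ⟨i, hi, hti⟩ := List.getElem_of_mem hrt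
  have h0 : 0 < t.length := by omega
  have hle1 : t[0] ≤ r := hti ▸ PySem.List.sorted_id_getElem_mono answer (Nat.zero_le i) hi
  have hle2 : r ≤ t[0] := hrle t[0] (hperm.mem_iff.mp (t.getElem_mem h0))
  have ht0 : t[0] = r := le_antisymm hle1 hle2
  -- pyGet? of the nonempty sorted list
  obtain ⟨b, bt, hbt⟩ := List.exists_cons_of_ne_nil (List.ne_nil_of_length_pos h0)
  have hget : PySem.List.pyGet? t 0 = some t[0] := by
    simp [hbt, PySem.List.pyGet?, PySem.List.pyIdx?]
  rw [hget, ht0]
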